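-- pv_equiv track=rewrite | github.com/hinoneko/Lab3 | .venv/Lab_4.py | calculate_total_degrees
-- ===== SOURCE A (Python) =====
-- def calculate_total_degrees(matrix, is_directed=True):
--     total_degrees = [0] * len(matrix)
--     for i in range(len(matrix)):
--         for j in range(len(matrix)):
--             if matrix[i][j] == 1:
--                 total_degrees[i] += 1
--                 if is_directed:
--                     total_degrees[j] += 1
--                 elif i == j:
--                     total_degrees[i] += 1
--     return total_degrees
-- ===== SOURCE B (Python) =====
-- def calculate_total_degrees(matrix, is_directed=True):
--     n = len(matrix)
--     row = [sum(1 for j in range(n) if matrix[i][j] == 1) for i in range(n)]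
--     if is_directed:
--         col = [sum(1 for i in range(n) if matrix[i][j] == 1) for j in range(n)]
--         return [row[k] + col[k] for k in range(n)]
--     return [row[k] + (1 if matrix[k][k] == 1 else 0) for k in range(n)]
-- ===== Notes on version B (the rewrite author's own statement) =====
-- stated objective: simpler
-- what changed: Replaces the single interleaved in-place-update double loop by separate aggregate passes: a row-count list, plus a column-count list when directed or a diagonal bonus when undirected, combined elementwise.
import Mathlib
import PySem

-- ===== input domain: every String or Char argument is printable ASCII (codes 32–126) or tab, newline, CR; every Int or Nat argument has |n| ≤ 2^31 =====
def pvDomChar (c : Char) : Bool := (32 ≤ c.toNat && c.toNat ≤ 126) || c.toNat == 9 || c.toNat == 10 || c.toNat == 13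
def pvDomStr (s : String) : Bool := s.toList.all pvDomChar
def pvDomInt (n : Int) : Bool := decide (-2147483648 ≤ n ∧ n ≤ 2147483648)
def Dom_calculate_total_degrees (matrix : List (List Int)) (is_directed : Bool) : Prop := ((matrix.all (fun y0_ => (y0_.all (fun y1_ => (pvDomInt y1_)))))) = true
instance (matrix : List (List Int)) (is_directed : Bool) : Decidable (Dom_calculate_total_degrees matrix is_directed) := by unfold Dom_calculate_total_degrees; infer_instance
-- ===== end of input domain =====

-- B replaces A's interleaved in-place-update double loop by separate aggregate passes
-- (row counts, plus column counts when directed or a diagonal bonus when undirected).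
-- Pre_ excludes matrices with a row shorter than len(matrix), on which Python A raises IndexError.

-- ===== PORT A =====
-- loop body of A's inner `for j` loop (index access made total with getD; Pre_ excludes out-of-range)
def pvBody (matrix : List (List Int)) (is_directed : Bool) (i : Nat) (td : List Int) (j : Nat) : List Int :=
  if (matrix.getD i []).getD j 0 = 1 then
    let td' := td.modify i (· + 1)
    if is_directed then td'.modify j (· + 1)
    else if i = j then td'.modify i (· + 1)
    else td'
  else td

def calculate_total_degrees (matrix : List (List Int)) (is_directed : Bool) : List Int :=
  (List.range matrix.length).foldl
    (fun td i => (List.range matrix.length).foldl (pvBody matrix is_directed i) td)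
    (List.replicate matrix.length 0)

-- ===== PORT B =====
def calculate_total_degrees_alt (matrix : List (List Int)) (is_directed : Bool) : List Int :=
  let n := matrix.length
  let row := (List.range n).map
    (fun i => ((List.range n).countP (fun j => decide ((matrix.getD i []).getD j 0 = 1)) : Int))
  if is_directed then
    let col := (List.range n).map
      (fun j => ((List.range n).countP (fun i => decide ((matrix.getD i []).getD j 0 = 1)) : Int))
    (List.range n).map (fun k => row.getD k 0 + col.getD k 0)
  else
    (List.range n).map (fun k => row.getD k 0 + (if (matrix.getD k []).getD k 0 = 1 then 1 else 0))

-- ===== PRECONDITION & SPEC =====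
-- Pre_: every row has at least len(matrix) entries; otherwise Python A raises IndexError.
def Pre_calculate_total_degrees (matrix : List (List Int)) (is_directed : Bool) : Prop :=
  ∀ row ∈ matrix, matrix.length ≤ row.length
instance (matrix : List (List Int)) (is_directed : Bool) : Decidable (Pre_calculate_total_degrees matrix is_directed) := by unfold Pre_calculate_total_degrees; infer_instance
def pvWitness_calculate_total_degrees : List (List Int) × Bool := ([[1, 0], [1, 1]], true)
def Spec_calculate_total_degrees (matrix : List (List Int)) (is_directed : Bool) (out : List Int) : Prop := out = calculate_total_degrees_alt matrix is_directed
instance (matrix : List (List Int)) (is_directed : Bool) (out : List Int) : Decidable (Spec_calculate_total_degrees matrix is_directed out) := by unfold Spec_calculate_total_degrees; infer_instance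

-- ===== CLAIM (what is proved, stated in full; the proofs are below) =====
def Claim_equal_calculate_total_degrees : Prop := ∀ (matrix : List (List Int)) (is_directed : Bool), Dom_calculate_total_degrees matrix is_directed → Pre_calculate_total_degrees matrix is_directed → Spec_calculate_total_degrees matrix is_directed (calculate_total_degrees matrix is_directed)

-- ===== LEMMAS AND PROOFS =====
set_option maxHeartbeats 1000000

-- matrix entry as both ports read it
def pvM (matrix : List (List Int)) (i j : Nat) : Int := (matrix.getD i []).getD j 0

theorem pv_getD_modify (l : List Int) (i k : Nat) (f : Int → Int) (hk : k < l.length) :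
    (l.modify i f).getD k 0 = if k = i then f (l.getD k 0) else l.getD k 0 := by
  by_cases h : k = i
  · subst h
    simp [List.getD_eq_getElem?_getD, List.getElem?_modify, hk]
  · simp [List.getD_eq_getElem?_getD, List.getElem?_modify, h, Ne.symm h]

theorem pv_len_body (matrix : List (List Int)) (d : Bool) (i : Nat) (td : List Int) (j : Nat) :
    (pvBody matrix d i td j).length = td.length := by
  unfold pvBody; split_ifs <;> simp

theorem pv_len_inner (matrix : List (List Int)) (d : Bool) (i : Nat) (js : List Nat)
    (td : List Int) : (js.foldl (pvBody matrix d i) td).length = td.length := by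
  induction js generalizing td with
  | nil => rfl
  | cons j js ih => simp [List.foldl_cons, ih, pv_len_body]

theorem pv_countP_single (p : Nat → Bool) (k : Nat) (js : List Nat) (hnd : js.Nodup) :
    js.countP (fun j => p j && decide (j = k)) = if k ∈ js ∧ p k then 1 else 0 := by
  induction js with
  | nil => simp
  | cons a js ih =>
    rcases List.nodup_cons.mp hnd with ⟨ha, hnd'⟩
    rw [List.countP_cons, ih hnd']
    by_cases hak : a = k
    · subst hak
      by_cases hp : p a <;> simp [ha, hp]
    · by_cases hk : k ∈ js <;> by_cases hp : p k <;>
        simp [hak, Ne.symm hak, hk, hp]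

theorem pv_inner_true (matrix : List (List Int)) (i : Nat) (js : List Nat) (td : List Int)
    (htd : td.length = matrix.length) (hi : i < matrix.length)
    (hjs : ∀ j ∈ js, j < matrix.length) (k : Nat) (hk : k < matrix.length) :
    (js.foldl (pvBody matrix true i) td).getD k 0 =
      td.getD k 0 + (js.countP (fun j => decide (pvM matrix i j = 1) && decide (j = k)) : Int)
        + (if k = i then (js.countP (fun j => decide (pvM matrix i j = 1)) : Int) else 0) := by
  induction js generalizing td with
  | nil => simp
  | cons j js ih =>
    have hjs' : ∀ x ∈ js, x < matrix.length := fun x hx => hjs x (by simp [hx])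
    have hlen : (pvBody matrix true i td j).length = matrix.length := by
      rw [pv_len_body]; exact htd
    rw [List.foldl_cons, ih (pvBody matrix true i td j) hlen hjs']
    have hbody : (pvBody matrix true i td j).getD k 0 =
        td.getD k 0 + (if pvM matrix i j = 1 then
          ((if k = i then 1 else 0) + (if k = j then 1 else 0)) else 0) := by
      by_cases hm : pvM matrix i j = 1
      · have hm' : (matrix[i]?.getD [])[j]?.getD 0 = 1 := by
          simpa [pvM, List.getD_eq_getElem?_getD] using hm
        have e1 : pvBody matrix true i td j = (td.modify i (· + 1)).modify j (· + 1) := by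
          simp [pvBody, hm']
        rw [e1, pv_getD_modify _ j k _ (by simp [htd, hk]),
            pv_getD_modify _ i k _ (by omega)]
        by_cases hki : k = i <;> by_cases hkj : k = j <;> simp_all <;> first | rfl | ring | omega
      · have hm' : ¬ (matrix[i]?.getD [])[j]?.getD 0 = 1 := by
          simpa [pvM, List.getD_eq_getElem?_getD] using hm
        have e1 : pvBody matrix true i td j = td := by
          simp [pvBody, hm']
        simp [e1, hm]
    rw [hbody, List.countP_cons, List.countP_cons]
    clear hbody ih hjs hjs' hlen
    by_cases hm : pvM matrix i j = 1 <;> by_cases hki : k = i <;> by_cases hkj : k = j <;>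
      by_cases hij : i = j <;>
      simp_all <;> (try push_cast) <;> (try split_ifs) <;> omega

theorem pv_inner_false (matrix : List (List Int)) (i : Nat) (js : List Nat) (td : List Int)
    (htd : td.length = matrix.length) (hi : i < matrix.length)
    (hjs : ∀ j ∈ js, j < matrix.length) (k : Nat) (hk : k < matrix.length) :
    (js.foldl (pvBody matrix false i) td).getD k 0 =
      td.getD k 0 + (if k = i then
        (js.countP (fun j => decide (pvM matrix i j = 1)) : Int)
          + (js.countP (fun j => decide (pvM matrix i j = 1) && decide (j = i)) : Int)
        else 0) := by
  induction js generalizing td with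
  | nil => simp
  | cons j js ih =>
    have hjs' : ∀ x ∈ js, x < matrix.length := fun x hx => hjs x (by simp [hx])
    have hlen : (pvBody matrix false i td j).length = matrix.length := by
      rw [pv_len_body]; exact htd
    rw [List.foldl_cons, ih (pvBody matrix false i td j) hlen hjs']
    have hbody : (pvBody matrix false i td j).getD k 0 =
        td.getD k 0 + (if k = i then (if pvM matrix i j = 1 then
          (1 + (if j = i then 1 else 0)) else 0) else 0) := by
      by_cases hm : pvM matrix i j = 1
      · have hm' : (matrix[i]?.getD [])[j]?.getD 0 = 1 := by
          simpa [pvM, List.getD_eq_getElem?_getD] using hm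
        by_cases hij : i = j
        · subst hij
          have e1 : pvBody matrix false i td i = (td.modify i (· + 1)).modify i (· + 1) := by
            simp [pvBody, hm']
          rw [e1, pv_getD_modify _ i k _ (by simp [htd, hk]),
              pv_getD_modify _ i k _ (by omega)]
          by_cases hki : k = i <;> simp_all <;> first | rfl | ring | omega
        · have e1 : pvBody matrix false i td j = td.modify i (· + 1) := by
            simp [pvBody, hm', hij]
          rw [e1, pv_getD_modify _ i k _ (by omega)]
          by_cases hki : k = i <;> simp_all <;> omega
      · have hm' : ¬ (matrix[i]?.getD [])[j]?.getD 0 = 1 := by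
          simpa [pvM, List.getD_eq_getElem?_getD] using hm
        have e1 : pvBody matrix false i td j = td := by
          simp [pvBody, hm']
        simp [e1, hm]
    rw [hbody, List.countP_cons, List.countP_cons]
    clear hbody ih hjs hjs' hlen
    by_cases hm : pvM matrix i j = 1 <;> by_cases hki : k = i <;> by_cases hji : j = i <;>
      simp_all <;> (try push_cast) <;> (try split_ifs) <;> omega

theorem pv_outer_true (matrix : List (List Int)) (is : List Nat) (td : List Int)
    (htd : td.length = matrix.length) (hnd : is.Nodup)
    (his : ∀ i ∈ is, i < matrix.length) (k : Nat) (hk : k < matrix.length) :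
    (is.foldl (fun td i => (List.range matrix.length).foldl (pvBody matrix true i) td) td).getD k 0 =
      td.getD k 0 + (is.countP (fun i => decide (pvM matrix i k = 1)) : Int)
        + (if k ∈ is then ((List.range matrix.length).countP
            (fun j => decide (pvM matrix k j = 1)) : Int) else 0) := by
  induction is generalizing td with
  | nil => simp
  | cons i is ih =>
    rcases List.nodup_cons.mp hnd with ⟨hi_mem, hnd'⟩
    have hi : i < matrix.length := his i (by simp)
    have his' : ∀ x ∈ is, x < matrix.length := fun x hx => his x (by simp [hx])
    have hlen : ((List.range matrix.length).foldl (pvBody matrix true i) td).length = matrix.length := by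
      rw [pv_len_inner]; exact htd
    rw [List.foldl_cons, ih _ hlen hnd' his',
        pv_inner_true matrix i _ td htd hi (by simp) k hk,
        pv_countP_single _ k _ List.nodup_range, List.countP_cons]
    by_cases hki : k = i
    · subst hki
      by_cases hm : pvM matrix k k = 1 <;> simp [hi_mem, hk, hm] <;> push_cast <;> first | rfl | ring | omega
    · by_cases hm : pvM matrix i k = 1 <;> by_cases hmem : k ∈ is <;>
        simp [hki, fun h : i = k => hki h.symm, hm, hmem, hk] <;> push_cast <;> first | rfl | ring | omega

theorem pv_outer_false (matrix : List (List Int)) (is : List Nat) (td : List Int)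
    (htd : td.length = matrix.length) (hnd : is.Nodup)
    (his : ∀ i ∈ is, i < matrix.length) (k : Nat) (hk : k < matrix.length) :
    (is.foldl (fun td i => (List.range matrix.length).foldl (pvBody matrix false i) td) td).getD k 0 =
      td.getD k 0 + (if k ∈ is then
        ((List.range matrix.length).countP (fun j => decide (pvM matrix k j = 1)) : Int)
          + (if pvM matrix k k = 1 then 1 else 0) else 0) := by
  induction is generalizing td with
  | nil => simp
  | cons i is ih =>
    rcases List.nodup_cons.mp hnd with ⟨hi_mem, hnd'⟩
    have hi : i < matrix.length := his i (by simp)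
    have his' : ∀ x ∈ is, x < matrix.length := fun x hx => his x (by simp [hx])
    have hlen : ((List.range matrix.length).foldl (pvBody matrix false i) td).length = matrix.length := by
      rw [pv_len_inner]; exact htd
    rw [List.foldl_cons, ih _ hlen hnd' his',
        pv_inner_false matrix i _ td htd hi (by simp) k hk,
        pv_countP_single _ i _ List.nodup_range]
    by_cases hki : k = i
    · subst hki
      by_cases hm : pvM matrix k k = 1 <;> simp [hi_mem, hk, hm] <;> push_cast <;> first | rfl | ring | omega
    · by_cases hmem : k ∈ is <;> simp [hki, hmem] <;> push_cast <;> first | rfl | ring | omega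

theorem pv_getD_map_range (n : Nat) (f : Nat → Int) (k : Nat) (hk : k < n) :
    ((List.range n).map f).getD k 0 = f k := by
  rw [List.getD_eq_getElem?_getD, List.getElem?_map]
  simp [hk]

theorem pv_len_outer (matrix : List (List Int)) (d : Bool) (is : List Nat) (td : List Int) :
    (is.foldl (fun td i => (List.range matrix.length).foldl (pvBody matrix d i) td) td).length
      = td.length := by
  induction is generalizing td with
  | nil => rfl
  | cons i is ih => simp [List.foldl_cons, ih, pv_len_inner]

-- ===== VERDICT (by name: the statement is the Claim_ definition above) =====
theorem calculate_total_degrees_spec : Claim_equal_calculate_total_degrees := by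
  intro matrix is_directed _ _
  unfold Spec_calculate_total_degrees calculate_total_degrees calculate_total_degrees_alt
  have hrep : (List.replicate matrix.length (0 : Int)).length = matrix.length := by simp
  cases is_directed with
  | true =>
    rw [if_pos (rfl : true = true)]
    apply List.ext_getElem
    · simp [pv_len_outer]
    · intro k hk1 hk2
      have hk : k < matrix.length := by simpa [pv_len_outer] using hk1
      rw [← List.getD_eq_getElem _ 0 hk1, ← List.getD_eq_getElem _ 0 hk2]
      rw [pv_outer_true matrix _ _ hrep List.nodup_range (by simp) k hk]
      rw [pv_getD_map_range _ _ k hk, pv_getD_map_range _ _ k hk, pv_getD_map_range _ _ k hk]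
      simp [pvM, hk]
      ring
  | false =>
    rw [if_neg (by simp : ¬ false = true)]
    apply List.ext_getElem
    · simp [pv_len_outer]
    · intro k hk1 hk2
      have hk : k < matrix.length := by simpa [pv_len_outer] using hk1
      rw [← List.getD_eq_getElem _ 0 hk1, ← List.getD_eq_getElem _ 0 hk2]
      rw [pv_outer_false matrix _ _ hrep List.nodup_range (by simp) k hk]
      rw [pv_getD_map_range _ _ k hk, pv_getD_map_range _ _ k hk]
      simp [pvM, hk]
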